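-- pv_equiv track=rewrite | github.com/GR-python/solved-problems | askisi2.py | askisi
-- ===== SOURCE A (Python) =====
-- def askisi(a):
--   result=0
--   for i in range(1,10):
--     number=0
--     j=0
--     while j<i:
--       number=number+a*10**j#Δημιουργούμαι κάθε φορά τον ακέραιο πχ 22222(5 φορές το 2) ώς 2+2*10**1+2*10**2+2*10**3+2*10**4
--       j+=1
--     result+=number
--   return result
-- ===== SOURCE B (Python) =====
-- def askisi(a):
--   result = 0
--   num = 0
--   for _ in range(9):
--     num = num * 10 + a
--     result += num
--   return result
-- ===== Notes on version B (the rewrite author's own statement) =====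
-- stated objective: simpler
-- what changed: Replaced the nested loop that rebuilds each repdigit from powers of ten with a single loop maintaining a running repdigit (shift by one decimal digit and add a each step).
import Mathlib
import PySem

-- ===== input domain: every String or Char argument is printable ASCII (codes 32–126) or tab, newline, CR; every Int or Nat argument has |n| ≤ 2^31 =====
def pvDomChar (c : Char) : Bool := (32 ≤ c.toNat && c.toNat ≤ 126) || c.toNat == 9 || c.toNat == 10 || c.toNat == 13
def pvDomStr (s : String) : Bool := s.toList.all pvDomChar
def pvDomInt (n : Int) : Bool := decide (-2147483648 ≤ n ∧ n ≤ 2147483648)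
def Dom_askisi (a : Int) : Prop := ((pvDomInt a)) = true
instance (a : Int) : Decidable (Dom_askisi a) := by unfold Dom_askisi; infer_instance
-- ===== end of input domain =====

-- B replaces A's nested loop (rebuilding each repdigit from powers of ten) with one
-- loop extending a running repdigit: num = num*10 + a.  Objective: simpler.

-- ===== PORT A =====
-- inner while j<i: number += a*10**j; j += 1  — ported as a fold over range(0,i)
def askisiInner (a : Int) (i : Int) : Int :=
  (PySem.List.pyRange 0 i 1).foldl (fun number j => number + a * 10 ^ j.toNat) 0

def askisi (a : Int) : Int :=
  (PySem.List.pyRange 1 10 1).foldl (fun result i => result + askisiInner a i) 0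

-- ===== PORT B =====
def askisi_alt (a : Int) : Int :=
  ((List.range 9).foldl (fun (st : Int × Int) _ =>
      let num := st.2 * 10 + a
      (st.1 + num, num)) (0, 0)).1

-- ===== PRECONDITION & SPEC =====
def Spec_askisi (a : Int) (out : Int) : Prop := out = askisi_alt a
instance (a : Int) (out : Int) : Decidable (Spec_askisi a out) := by unfold Spec_askisi; infer_instance

-- ===== CLAIM (what is proved, stated in full; the proofs are below) =====
def Claim_equal_askisi : Prop := ∀ (a : Int), Dom_askisi a → Spec_askisi a (askisi a)

-- ===== LEMMAS AND PROOFS =====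
theorem askisi_eval (a : Int) : askisi a = a * 123456789 := by
  rw [askisi, show PySem.List.pyRange 1 10 1 = [1,2,3,4,5,6,7,8,9] from by decide]
  simp only [askisiInner,
    show PySem.List.pyRange 0 1 1 = [0] from by decide,
    show PySem.List.pyRange 0 2 1 = [0,1] from by decide,
    show PySem.List.pyRange 0 3 1 = [0,1,2] from by decide,
    show PySem.List.pyRange 0 4 1 = [0,1,2,3] from by decide,
    show PySem.List.pyRange 0 5 1 = [0,1,2,3,4] from by decide,
    show PySem.List.pyRange 0 6 1 = [0,1,2,3,4,5] from by decide,
    show PySem.List.pyRange 0 7 1 = [0,1,2,3,4,5,6] from by decide,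
    show PySem.List.pyRange 0 8 1 = [0,1,2,3,4,5,6,7] from by decide,
    show PySem.List.pyRange 0 9 1 = [0,1,2,3,4,5,6,7,8] from by decide,
    List.foldl_cons, List.foldl_nil]
  norm_num [show (2:Int).toNat=2 from rfl, show (3:Int).toNat=3 from rfl,
    show (4:Int).toNat=4 from rfl, show (5:Int).toNat=5 from rfl,
    show (6:Int).toNat=6 from rfl, show (7:Int).toNat=7 from rfl,
    show (8:Int).toNat=8 from rfl]
  ring

theorem askisi_alt_eval (a : Int) : askisi_alt a = a * 123456789 := by
  rw [askisi_alt, show List.range 9 = [0,1,2,3,4,5,6,7,8] from by decide]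
  simp only [List.foldl_cons, List.foldl_nil]
  ring

-- ===== VERDICT (by name: the statement is the Claim_ definition above) =====
theorem askisi_spec : Claim_equal_askisi := by
  intro a _
  unfold Spec_askisi
  rw [askisi_eval, askisi_alt_eval]
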